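-- pv_equiv track=rewrite | github.com/JawaharChirimar/AIbyJC | DigitNN/DataManagement/FontDigitGenerator.py | get_font_weights_to_use
-- ===== SOURCE A (Python) =====
-- def get_font_weights_to_use(files):
--     """
--     Select ONE font weight to use from available files.
--
--     Priority: regular > bold > thin > any available
--
--     Returns:
--         List of (weight_name, url) tuples (single item)
--     """
--     # Priority order: regular first, then bold, then thin
--     priority_order = ["regular", "400", "500", "700", "600", "800", "900", "300", "200", "100"]
--
--     for w in priority_order:
--         if w in files:
--             return [(w, files[w])]
--
--     # If none of the preferred weights found, use whatever is available
--     if files: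
--         first_key = next(iter(files))
--         return [(first_key, files[first_key])]
--
--     return []
-- ===== SOURCE B (Python) =====
-- def get_font_weights_to_use(files):
--     """
--     Select ONE font weight to use from available files.
--
--     Priority: regular > bold > thin > any available
--
--     Returns:
--         List of (weight_name, url) tuples (single item)
--     """
--     priority_order = ["regular", "400", "500", "700", "600", "800", "900", "300", "200", "100"]
--     if not files:
--         return []
--     # Rank table: scan the data once through an index table instead of
--     # scanning the priority list against the dict.
--     rank = {w: i for i, w in enumerate(priority_order)}
--     best = min(files, key=lambda w: rank.get(w, len(priority_order)))
--     return [(best, files[best])]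
-- ===== Notes on version B (the rewrite author's own statement) =====
-- stated objective: idiomatic
-- what changed: Instead of scanning the fixed priority list against the dict with an early-return loop plus a separate fallback branch, B builds a rank index once and selects the single best key with min() over the dict's keys (unlisted keys get a sentinel rank past all real ones, and min's first-wins stability reproduces the first-key fallback).
import Mathlib
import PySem

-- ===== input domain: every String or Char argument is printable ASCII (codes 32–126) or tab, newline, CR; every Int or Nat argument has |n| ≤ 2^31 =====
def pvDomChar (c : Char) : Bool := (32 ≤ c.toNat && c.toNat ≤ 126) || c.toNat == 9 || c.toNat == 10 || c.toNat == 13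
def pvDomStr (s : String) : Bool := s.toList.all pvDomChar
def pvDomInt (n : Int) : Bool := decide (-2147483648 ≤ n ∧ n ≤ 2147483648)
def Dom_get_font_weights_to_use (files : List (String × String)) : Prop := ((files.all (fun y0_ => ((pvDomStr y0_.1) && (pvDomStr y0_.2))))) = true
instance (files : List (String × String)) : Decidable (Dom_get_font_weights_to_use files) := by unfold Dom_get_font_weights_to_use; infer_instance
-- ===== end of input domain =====

-- B replaces A's priority-list scan + fallback branch by a rank index and a single min() over the dict's keys (idiomatic; same result).


-- ===== PORT A =====
-- the 'for w in priority_order' loop with its early returns; the final two returns are the base case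
def pvLoopA (files : List (String × String)) : List String → List (String × String)
  | [] =>
    -- if files: first_key = next(iter(files)); return [(first_key, files[first_key])]  /  return []
    match files with
    | [] => []
    | (k, _) :: _ => [(k, (PySem.Dict.mk files).getD k "")]   -- files[first_key]: key present, default unreachable
  | w :: rest =>
    if (PySem.Dict.mk files).contains w then
      [(w, (PySem.Dict.mk files).getD w "")]                  -- files[w]: guarded by 'w in files', default unreachable
    else pvLoopA files rest

def get_font_weights_to_use (files : List (String × String)) : List (String × String) :=
  pvLoopA files ["regular", "400", "500", "700", "600", "800", "900", "300", "200", "100"]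

-- ===== PORT B =====
def get_font_weights_to_use_alt (files : List (String × String)) : List (String × String) :=
  let priority_order : List String := ["regular", "400", "500", "700", "600", "800", "900", "300", "200", "100"]
  if files = [] then []
  else
    -- rank = {w: i for i, w in enumerate(priority_order)}
    let rank : PySem.Dict String Int :=
      PySem.Dict.ofList ((PySem.List.enumerate priority_order).map (fun p => (p.2, p.1)))
    -- best = min(files, key=lambda w: rank.get(w, len(priority_order)))
    match PySem.List.min? (files.map Prod.fst)
        (fun w => rank.getD w ((priority_order.length : Int))) with
    | some best => [(best, (PySem.Dict.mk files).getD best "")]  -- files[best]: best is a key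
    | none => []  -- unreachable: files ≠ []

-- ===== PRECONDITION & SPEC =====
def Spec_get_font_weights_to_use (files : List (String × String)) (out : List (String × String)) : Prop := out = get_font_weights_to_use_alt files
instance (files : List (String × String)) (out : List (String × String)) : Decidable (Spec_get_font_weights_to_use files out) := by unfold Spec_get_font_weights_to_use; infer_instance

-- ===== CLAIM (what is proved, stated in full; the proofs are below) =====
def Claim_equal_get_font_weights_to_use : Prop := ∀ (files : List (String × String)), Dom_get_font_weights_to_use files → Spec_get_font_weights_to_use files (get_font_weights_to_use files)

-- ===== LEMMAS AND PROOFS =====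

-- the priority list, named for the proofs
def pvP : List String := ["regular", "400", "500", "700", "600", "800", "900", "300", "200", "100"]

-- B's rank key is exactly 'index in the priority list, 10 if absent' — and List.idxOf is exactly that
theorem pvRank_eq_idxOf (w : String) :
    (PySem.Dict.ofList ((PySem.List.enumerate pvP).map (fun p => (p.2, p.1)))).getD w ((pvP.length : Int))
      = (pvP.idxOf w : Int) := by
  rw [show (PySem.Dict.ofList ((PySem.List.enumerate pvP).map (fun p => (p.2, p.1))))
      = PySem.Dict.mk [("regular",0),("400",1),("500",2),("700",3),("600",4),("800",5),("900",6),("300",7),("200",8),("100",9)] from by decide]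
  simp only [pvP, PySem.Dict.getD_eq_get?_getD, PySem.Dict.get?_mk_cons, List.idxOf, List.findIdx_cons]
  split_ifs <;> simp_all [Bool.cond_eq_ite, PySem.Dict.get?]

-- B's body with the rank lookup replaced by List.idxOf into pvP
theorem pvAlt_eq (files : List (String × String)) :
    get_font_weights_to_use_alt files =
      (if files = [] then []
       else match PySem.List.min? (files.map Prod.fst) (fun w => (pvP.idxOf w : Int)) with
        | some best => [(best, (PySem.Dict.mk files).getD best "")]
        | none => []) := by
  have hk : (fun w : String =>
      (PySem.Dict.ofList ((PySem.List.enumerate ["regular", "400", "500", "700", "600", "800", "900", "300", "200", "100"]).map (fun p => (p.2, p.1)))).getD w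
        (((["regular", "400", "500", "700", "600", "800", "900", "300", "200", "100"] : List String).length : Int)))
      = fun w => (pvP.idxOf w : Int) := funext fun w => pvRank_eq_idxOf w
  simp only [get_font_weights_to_use_alt]
  rw [hk]

-- min? keeps its first element when the key is constant
theorem pvMin?_const {α : Type} (key : α → Int) (c : Int) (x : α) (t : List α)
    (h : ∀ y ∈ x :: t, key y = c) : PySem.List.min? (x :: t) key = some x := by
  have hx : key x = c := h x (by simp)
  have aux : ∀ (l : List α), (∀ y ∈ l, key y = c) →
      l.foldl (fun acc y => match acc with
        | none => some y
        | some m => if key y < key m then some y else some m) (some x) = some x := by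
    intro l
    induction l with
    | nil => intro _; rfl
    | cons a l ih =>
      intro hl
      have ha : key a = c := hl a (by simp)
      simp only [List.foldl_cons]
      rw [show (if key a < key x then some a else some x) = some x from by
        rw [ha, hx]; simp]
      exact ih (fun y hy => hl y (by simp [hy]))
  simp only [PySem.List.min?, List.foldl_cons]
  exact aux t (fun y hy => h y (by simp [hy]))

-- every key of files ranks at least i when the first i priorities are missing
theorem pvIdx_ge (ks : List String) (i : Nat) (hi : i ≤ pvP.length)
    (hprev : ∀ j, j < i → ∀ (hj : j < pvP.length), pvP[j] ∉ ks) :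
    ∀ y ∈ ks, i ≤ pvP.idxOf y := by
  intro y hy
  by_contra hlt
  push Not at hlt
  have hylen : pvP.idxOf y < pvP.length := lt_of_lt_of_le hlt hi
  have := hprev (pvP.idxOf y) hlt hylen
  rw [List.getElem_idxOf hylen] at this
  exact this hy

-- if w is a present key of minimal priority rank (a listed one), B picks w
theorem pvAlt_picks (files : List (String × String)) (w : String)
    (hmem : w ∈ files.map Prod.fst)
    (hmin : ∀ y ∈ files.map Prod.fst, pvP.idxOf w ≤ pvP.idxOf y)
    (hw : pvP.idxOf w < pvP.length) :
    get_font_weights_to_use_alt files = [(w, (PySem.Dict.mk files).getD w "")] := by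
  have hne : files ≠ [] := by intro h; subst h; simp at hmem
  rw [pvAlt_eq, if_neg hne]
  cases hm : PySem.List.min? (files.map Prod.fst) (fun y => (pvP.idxOf y : Int)) with
  | none => exact absurd ((PySem.List.min?_eq_none_iff _ _).mp hm) (by intro h; rw [h] at hmem; simp at hmem)
  | some m =>
    have hmm : m ∈ files.map Prod.fst := PySem.List.min?_mem hm
    have h1 : (pvP.idxOf m : Int) ≤ (pvP.idxOf w : Int) := PySem.List.min?_isMin hm w hmem
    have h2 : pvP.idxOf w ≤ pvP.idxOf m := hmin m hmm
    have heq : pvP.idxOf m = pvP.idxOf w := by omega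
    have hmlen : pvP.idxOf m < pvP.length := heq ▸ hw
    have : m = w := by
      calc m = pvP[pvP.idxOf m]'hmlen := (List.getElem_idxOf hmlen).symm
        _ = pvP[pvP.idxOf w]'hw := by simp [heq]
        _ = w := List.getElem_idxOf hw
    simp [this]

-- if no priority weight is present, B falls back to the first key
theorem pvAlt_fallback (f : String × String) (t : List (String × String))
    (hall : ∀ y ∈ (f :: t).map Prod.fst, pvP.idxOf y = pvP.length) :
    get_font_weights_to_use_alt (f :: t) = [(f.1, (PySem.Dict.mk (f :: t)).getD f.1 "")] := by
  rw [pvAlt_eq, if_neg (by simp)]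
  have hconst : ∀ y ∈ f.1 :: t.map Prod.fst, ((pvP.idxOf y : Int)) = (pvP.length : Int) := by
    intro y hy
    have := hall y (by simpa using hy)
    exact_mod_cast this
  rw [show (f :: t).map Prod.fst = f.1 :: t.map Prod.fst from rfl,
    pvMin?_const _ (pvP.length : Int) f.1 (t.map Prod.fst) hconst]

-- A's remaining loop (from priority index i) agrees with B
theorem pvLoop_eq (f : String × String) (t : List (String × String)) :
    ∀ (n i : Nat), i ≤ pvP.length → pvP.length - i = n →
    (∀ j, j < i → ∀ (hj : j < pvP.length), pvP[j] ∉ (f :: t).map Prod.fst) →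
    pvLoopA (f :: t) (pvP.drop i) = get_font_weights_to_use_alt (f :: t) := by
  intro n
  induction n with
  | zero =>
    intro i hi hn hprev
    have hiL : i = pvP.length := by omega
    subst hiL
    rw [List.drop_length]
    have hall : ∀ y ∈ (f :: t).map Prod.fst, pvP.idxOf y = pvP.length := fun y hy =>
      le_antisymm List.idxOf_le_length (pvIdx_ge _ _ le_rfl hprev y hy)
    rw [pvAlt_fallback f t hall]
    rfl
  | succ n ih =>
    intro i hi hn hprev
    have hiL : i < pvP.length := by omega
    rw [List.drop_eq_getElem_cons hiL]
    simp only [pvLoopA]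
    have hidx : pvP.idxOf pvP[i] = i := List.Nodup.idxOf_getElem (by decide) i hiL
    by_cases hc : (PySem.Dict.mk (f :: t)).contains pvP[i] = true
    · rw [if_pos hc]
      have hmem : pvP[i] ∈ (f :: t).map Prod.fst := by
        have := (PySem.Dict.contains_iff_mem_keys _ _).mp hc
        simpa [PySem.Dict.keys_mk] using this
      exact (pvAlt_picks (f :: t) pvP[i] hmem
        (fun y hy => by rw [hidx]; exact pvIdx_ge _ i (le_of_lt hiL) hprev y hy)
        (hidx ▸ hiL)).symm
    · rw [if_neg hc]
      refine ih (i + 1) (by omega) (by omega) ?_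
      intro j hj hjL hmemj
      rcases Nat.lt_succ_iff_lt_or_eq.mp hj with hlt | heq
      · exact hprev j hlt hjL hmemj
      · subst heq
        apply hc
        rw [PySem.Dict.contains_iff_mem_keys, PySem.Dict.keys_mk]
        exact hmemj

-- ===== VERDICT (by name: the statement is the Claim_ definition above) =====
theorem get_font_weights_to_use_spec : Claim_equal_get_font_weights_to_use := by
  intro files _
  unfold Spec_get_font_weights_to_use
  cases files with
  | nil => decide
  | cons f t =>
    have h := pvLoop_eq f t pvP.length 0 (by omega) (by omega) (by intro j hj; omega)
    simpa [pvP] using h
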